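-- pv_equiv track=rewrite | github.com/aarnav-hariramani/Simplify-CS-Internship-Pinger | pinger.py | get_section_slice
-- ===== SOURCE A (Python) =====
-- def get_section_slice(md: str, section_title: str) -> str:
--     lines = md.splitlines()
--     try:
--         sec_idx = next(
--             i for i, ln in enumerate(lines)
--             if ln.strip().startswith("##") and section_title.lower() in ln.lower()
--         )
--     except StopIteration:
--         raise RuntimeError(f"Could not find section header: {section_title}")
--
--     try:
--         next_header = next(i for i in range(sec_idx + 1, len(lines)) if lines[i].startswith("## "))
--     except StopIteration:
--         next_header = len(lines)
--
--     return "\n".join(lines[sec_idx:next_header])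
-- ===== SOURCE B (Python) =====
-- def get_section_slice(md: str, section_title: str) -> str:
--     needle = section_title.lower()
--     found = False
--     out = []
--     for ln in md.splitlines():
--         if not found:
--             if ln.strip().startswith("##") and needle in ln.lower():
--                 found = True
--                 out.append(ln)
--         else:
--             if ln.startswith("## "):
--                 break
--             out.append(ln)
--     if not found:
--         raise RuntimeError(f"Could not find section header: {section_title}")
--     return "\n".join(out)
-- ===== Notes on version B (the rewrite author's own statement) =====
-- stated objective: simpler
-- what changed: Replaced the index-based search (enumerate to find the header index, a range scan for the next header, then a list slice) with a single pass over the lines using a found-flag and an accumulator that breaks at the next '## ' header.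
import Mathlib
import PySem

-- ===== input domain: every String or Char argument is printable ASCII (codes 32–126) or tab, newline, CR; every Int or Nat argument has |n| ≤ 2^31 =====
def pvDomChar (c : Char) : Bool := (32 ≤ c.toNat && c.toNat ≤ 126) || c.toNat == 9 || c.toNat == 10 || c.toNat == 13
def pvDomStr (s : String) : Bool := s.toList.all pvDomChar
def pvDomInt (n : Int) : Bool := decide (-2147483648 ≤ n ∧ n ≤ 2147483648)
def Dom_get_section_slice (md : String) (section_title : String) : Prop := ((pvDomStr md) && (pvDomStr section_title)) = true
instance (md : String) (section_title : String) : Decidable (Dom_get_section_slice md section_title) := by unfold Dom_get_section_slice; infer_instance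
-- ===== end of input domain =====

-- B replaces A's index search + range scan + slice by one pass with a found-flag and an accumulator (same cost, simpler).
-- Pre_ excludes inputs with no matching section header, on which the Python (A and B alike) raises RuntimeError.


-- ===== PORT A =====
-- the header test both Pythons share: ln.strip().startswith("##") and section_title.lower() in ln.lower()
def secCond (section_title : String) (ln : String) : Bool :=
  PySem.Str.startswith (PySem.Str.strip ln) "##" &&
    PySem.Str.isIn (PySem.Str.lower section_title) (PySem.Str.lower ln)

-- next(i for i in range(j, len(lines)) if lines[i].startswith("## ")), defaulting to len(lines)
-- (lines[i] is in range here, so getD is exact)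
def findNextA (lines : List String) (j : Nat) : Nat :=
  if j < lines.length then
    if PySem.Str.startswith (lines.getD j "") "## " then j else findNextA lines (j + 1)
  else lines.length
termination_by lines.length - j

def get_section_slice (md : String) (section_title : String) : String :=
  let lines := PySem.Str.splitlines md
  match lines.findIdx? (secCond section_title) with
  | none => ""   -- Python raises RuntimeError here; excluded by Pre_
  | some i =>
      PySem.Str.join "\n"
        (PySem.List.slice lines (some (i : Int)) (some ((findNextA lines (i + 1) : Nat) : Int)))

-- ===== PORT B =====
-- the found-phase of B's loop: collect lines until one startswith("## ") (break)
def takeUntilHeader : List String → List String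
  | [] => []
  | ln :: rest =>
      if PySem.Str.startswith ln "## " then [] else ln :: takeUntilHeader rest

-- the not-found phase of B's loop; none = loop ends with found == False (RuntimeError)
def scanB (needle : String) : List String → Option (List String)
  | [] => none
  | ln :: rest =>
      if PySem.Str.startswith (PySem.Str.strip ln) "##" && PySem.Str.isIn needle (PySem.Str.lower ln)
      then some (ln :: takeUntilHeader rest)
      else scanB needle rest

def get_section_slice_alt (md : String) (section_title : String) : String :=
  match scanB (PySem.Str.lower section_title) (PySem.Str.splitlines md) with
  | none => ""   -- Python raises RuntimeError here; excluded by Pre_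
  | some out => PySem.Str.join "\n" out

-- ===== PRECONDITION & SPEC =====
-- Pre_: some line is a matching section header; otherwise both Pythons raise RuntimeError.
def Pre_get_section_slice (md : String) (section_title : String) : Prop :=
  ∃ ln ∈ PySem.Str.splitlines md, secCond section_title ln = true
instance (md : String) (section_title : String) : Decidable (Pre_get_section_slice md section_title) := by
  unfold Pre_get_section_slice; infer_instance

def pvWitness_get_section_slice : String × String := ("## Setup\nrun it", "setup")

def Spec_get_section_slice (md : String) (section_title : String) (out : String) : Prop := out = get_section_slice_alt md section_title
instance (md : String) (section_title : String) (out : String) : Decidable (Spec_get_section_slice md section_title out) := by unfold Spec_get_section_slice; infer_instance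

-- ===== CLAIM (what is proved, stated in full; the proofs are below) =====
def Claim_equal_get_section_slice : Prop := ∀ (md : String) (section_title : String), Dom_get_section_slice md section_title → Pre_get_section_slice md section_title → Spec_get_section_slice md section_title (get_section_slice md section_title)

-- ===== LEMMAS AND PROOFS =====

theorem findNextA_shift (ln : String) (rest : List String) (j : Nat) :
    findNextA (ln :: rest) (j + 1) = findNextA rest j + 1 := by
  unfold findNextA
  by_cases h : j < rest.length
  · simp only [List.length_cons, Nat.add_lt_add_iff_right, h, if_pos, List.getD_cons_succ]
    split
    · rfl
    · exact findNextA_shift ln rest (j + 1)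
  · simp [h]
termination_by rest.length - j

theorem take_findNextA (rest : List String) :
    rest.take (findNextA rest 0) = takeUntilHeader rest := by
  induction rest with
  | nil => simp [findNextA, takeUntilHeader]
  | cons l r ih =>
      rw [takeUntilHeader]
      rw [findNextA]
      simp only [List.length_cons, Nat.succ_pos, if_pos, List.getD_cons_zero]
      split
      · simp
      · rw [findNextA_shift, List.take_succ_cons, ih]

theorem core_eq (section_title : String) (lines : List String) :
    (match lines.findIdx? (secCond section_title) with
     | none => ""
     | some i =>
        PySem.Str.join "\n"
          (PySem.List.slice lines (some (i : Int)) (some ((findNextA lines (i + 1) : Nat) : Int)))) =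
    (match scanB (PySem.Str.lower section_title) lines with
     | none => ""
     | some out => PySem.Str.join "\n" out) := by
  induction lines with
  | nil => rfl
  | cons ln rest ih =>
      rw [scanB, List.findIdx?_cons]
      by_cases hc : secCond section_title ln = true
      · have hc' : (PySem.Str.startswith (PySem.Str.strip ln) "##" &&
            PySem.Str.isIn (PySem.Str.lower section_title) (PySem.Str.lower ln)) = true := hc
        rw [if_pos hc, if_pos hc']
        show PySem.Str.join "\n"
            (PySem.List.slice (ln :: rest) (some ((0 : Nat) : Int))
              (some ((findNextA (ln :: rest) 1 : Nat) : Int))) = _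
        rw [PySem.List.slice_natCast, findNextA_shift]
        simp only [List.drop_zero, Nat.sub_zero, List.take_succ_cons, take_findNextA]
      · have hc' : ¬ ((PySem.Str.startswith (PySem.Str.strip ln) "##" &&
            PySem.Str.isIn (PySem.Str.lower section_title) (PySem.Str.lower ln)) = true) := hc
        rw [if_neg hc, if_neg hc']
        rw [← ih]
        cases hfi : rest.findIdx? (secCond section_title) with
        | none => simp
        | some i =>
            simp only [Option.map_some]
            show PySem.Str.join "\n"
                (PySem.List.slice (ln :: rest) (some ((i + 1 : Nat) : Int))
                  (some ((findNextA (ln :: rest) (i + 1 + 1) : Nat) : Int))) = _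
            rw [PySem.List.slice_natCast, PySem.List.slice_natCast, findNextA_shift]
            simp [List.drop_succ_cons, Nat.succ_sub_succ]

-- ===== VERDICT (by name: the statement is the Claim_ definition above) =====
theorem get_section_slice_spec : Claim_equal_get_section_slice := by
  intro md section_title _ _
  unfold Spec_get_section_slice get_section_slice get_section_slice_alt
  exact core_eq section_title (PySem.Str.splitlines md)
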